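-- pv_equiv track=rewrite | github.com/willsun888/somecode | algorithm/dailycode62.py | get_ways2
-- ===== SOURCE A (Python) =====
-- def get_ways2(n, m):
--     arr = [[0 for _ in range(m)] for _ in range(n)]
--
--     for i in range(0, n):
--         arr[i][0] = 1
--
--     for j in range(0, m):
--         arr[0][j] = 1
--
--     for i in range(1, n):
--         for j in range(1, m):
--             arr[i][j] = arr[i-1][j]+arr[i][j-1]
--
--     return arr[-1][-1]
-- ===== SOURCE B (Python) =====
-- def get_ways2(n, m):
--     # number of monotonic lattice paths = C((n-1)+(m-1), min(n-1, m-1)),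
--     # computed by the multiplicative binomial formula (exact at every step)
--     if n < 1 or m < 1:
--         raise IndexError("grid has no cells")
--     a, b = n - 1, m - 1
--     k = min(a, b)
--     res = 1
--     for i in range(1, k + 1):
--         res = res * (a + b - k + i) // i
--     return res
-- ===== Notes on version B (the rewrite author's own statement) =====
-- stated objective: faster
-- what changed: Replaced the n*m dynamic-programming grid by a direct closed-form binomial coefficient C(n+m-2, min(n-1,m-1)) computed with the multiplicative formula in one O(min(n,m)) loop.
import Mathlib
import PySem

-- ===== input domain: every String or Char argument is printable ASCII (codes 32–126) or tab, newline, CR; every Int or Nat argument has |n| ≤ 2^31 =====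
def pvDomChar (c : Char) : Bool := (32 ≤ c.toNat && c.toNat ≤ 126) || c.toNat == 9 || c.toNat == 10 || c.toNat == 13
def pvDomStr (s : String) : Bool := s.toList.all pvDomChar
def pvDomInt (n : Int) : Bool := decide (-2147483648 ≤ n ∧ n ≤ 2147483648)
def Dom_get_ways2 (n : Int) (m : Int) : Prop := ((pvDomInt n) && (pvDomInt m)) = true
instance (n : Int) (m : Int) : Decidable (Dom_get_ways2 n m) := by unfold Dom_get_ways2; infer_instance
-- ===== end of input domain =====

-- B replaces A's O(n*m) dynamic-programming grid by the closed-form binomial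
-- coefficient C(n+m-2, min(n-1,m-1)), computed with the multiplicative formula
-- in a single O(min(n,m)) loop (faster: asymptotic change).

-- ===== PORT A =====
-- arr[i][j] read (indices used are nonnegative here)
def pvCellN (arr : Array (Array Int)) (i j : Nat) : Int :=
  (arr.getD i #[]).getD j 0

def pvCell (arr : Array (Array Int)) (i j : Int) : Int :=
  pvCellN arr i.toNat j.toNat

-- arr[i][j] = v  (indices used are nonnegative and in range on Pre_; the grid is an
-- Array so that, like Python's list assignment, one cell write costs O(1))
def pvSetCell (arr : Array (Array Int)) (i j : Int) (v : Int) : Array (Array Int) :=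
  arr.modify i.toNat (fun row => row.setIfInBounds j.toNat v)

def get_ways2 (n : Int) (m : Int) : Int :=
  -- arr = [[0 for _ in range(m)] for _ in range(n)]
  let arr0 := ((PySem.List.pyRange 0 n 1).map
    (fun _ => ((PySem.List.pyRange 0 m 1).map (fun _ => (0 : Int))).toArray)).toArray
  -- for i in range(0, n): arr[i][0] = 1
  let arr1 := (PySem.List.pyRange 0 n 1).foldl (fun a i => pvSetCell a i 0 1) arr0
  -- for j in range(0, m): arr[0][j] = 1
  let arr2 := (PySem.List.pyRange 0 m 1).foldl (fun a j => pvSetCell a 0 j 1) arr1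
  -- for i in range(1, n): for j in range(1, m): arr[i][j] = arr[i-1][j] + arr[i][j-1]
  let arr3 := (PySem.List.pyRange 1 n 1).foldl (fun a i =>
      (PySem.List.pyRange 1 m 1).foldl (fun a j =>
        pvSetCell a i j (pvCell a (i - 1) j + pvCell a i (j - 1))) a) arr2
  -- return arr[-1][-1]  (in range on Pre_; 0 is never the result of a fallback inside Pre_)
  (PySem.List.pyGet? ((PySem.List.pyGet? arr3.toList (-1)).getD #[]).toList (-1)).getD 0

-- ===== PORT B =====
def get_ways2_alt (n : Int) (m : Int) : Int :=
  -- if n < 1 or m < 1: raise IndexError  (B raises outside Pre_; 0 marks the raise here)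
  if n < 1 ∨ m < 1 then 0 else
  -- a, b = n - 1, m - 1
  let a := n - 1
  let b := m - 1
  -- k = min(a, b)
  let k := min a b
  -- res = 1; for i in range(1, k + 1): res = res * (a + b - k + i) // i
  (PySem.List.pyRange 1 (k + 1) 1).foldl
    (fun res i => PySem.Int.floordiv (res * (a + b - k + i)) i) 1

-- ===== PRECONDITION & SPEC =====
-- Pre_ excludes n < 1 or m < 1, where A's 'arr[-1][-1]' raises IndexError on the empty grid.
def Pre_get_ways2 (n : Int) (m : Int) : Prop := 1 ≤ n ∧ 1 ≤ m
instance (n : Int) (m : Int) : Decidable (Pre_get_ways2 n m) := by unfold Pre_get_ways2; infer_instance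
def pvWitness_get_ways2 : Int × Int := (3, 4)

def Spec_get_ways2 (n : Int) (m : Int) (out : Int) : Prop := out = get_ways2_alt n m
instance (n : Int) (m : Int) (out : Int) : Decidable (Spec_get_ways2 n m out) := by unfold Spec_get_ways2; infer_instance

-- ===== CLAIM (what is proved, stated in full; the proofs are below) =====
def Claim_equal_get_ways2 : Prop := ∀ (n : Int) (m : Int), Dom_get_ways2 n m → Pre_get_ways2 n m → Spec_get_ways2 n m (get_ways2 n m)

-- ===== LEMMAS AND PROOFS =====

-- the value every grid cell converges to
def pvVal (i j : Nat) : Int := ((i + j).choose i : Int)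

-- generic loop invariant for a fold over range(a, b)
theorem pv_foldl_pyRange_inv {α : Type} (f : α → Int → α) (inv : α → Int → Prop)
    (a b : Int) (s : α) (hab : a ≤ b) (h0 : inv s a)
    (hstep : ∀ t i, a ≤ i → i < b → inv t i → inv (f t i) (i + 1)) :
    inv ((PySem.List.pyRange a b 1).foldl f s) b := by
  obtain ⟨k, hk⟩ : ∃ k : Nat, b = a + k := ⟨(b - a).toNat, by omega⟩
  subst hk
  clear hab
  induction k generalizing a s with
  | zero => simpa [PySem.List.pyRange_one_eq_nil (by omega : a + ((0:Nat):Int) ≤ a)] using h0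
  | succ k ih =>
    rw [PySem.List.pyRange_one_cons (by push_cast; omega)]
    rw [List.foldl_cons]
    have h1 : inv (f s a) (a + 1) :=
      hstep s a le_rfl (by push_cast; omega) h0
    have := ih (a + 1) (f s a) h1
      (fun t i hi hib hinv => hstep t i (by omega) (by push_cast at hib ⊢; omega) hinv)
    have harg : a + 1 + ((k : Nat) : Int) = a + (((k + 1 : Nat)) : Int) := by push_cast; omega
    rwa [harg] at this

theorem pv_getD_eq_getElem {α : Type} (a : Array α) (i : Nat) (d : α) (h : i < a.size) :
    a.getD i d = a[i] := by
  rw [Array.getD_eq_getD_getElem?, Array.getElem?_eq_getElem h]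
  rfl

theorem pv_getD_set {α : Type} (l : Array α) (i : Nat) (x : α) (j : Nat) (d : α) :
    (l.setIfInBounds i x).getD j d = if j = i ∧ i < l.size then x else l.getD j d := by
  rw [Array.getD_eq_getD_getElem?, Array.getElem?_setIfInBounds]
  split_ifs with h1 h2 h3 <;> simp_all [Array.getD_eq_getD_getElem?]

-- reading a row after a row update
theorem pv_getD_modify (arr : Array (Array Int)) (iN : Nat) (g : Array Int → Array Int)
    (i' : Nat) :
    ((arr.modify iN g).getD i' #[])
      = if iN = i' ∧ i' < arr.size then g (arr.getD i' #[]) else arr.getD i' #[] := by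
  rw [Array.getD_eq_getD_getElem?, Array.getElem?_modify]
  by_cases h : iN = i'
  · subst h
    rw [if_pos rfl]
    by_cases h2 : iN < arr.size
    · rw [Array.getElem?_eq_getElem h2]
      simp [pv_getD_eq_getElem _ _ _ h2, h2]
    · rw [Array.getElem?_eq_none (by omega)]
      simp only [Option.map_none, Option.getD_none]
      rw [if_neg (by tauto), Array.getD_eq_getD_getElem?, Array.getElem?_eq_none (by omega)]
      rfl
  · rw [if_neg h, if_neg (by tauto), Array.getD_eq_getD_getElem?]

-- reading a cell after a write
theorem pvCellN_set (arr : Array (Array Int)) (i j : Int) (v : Int) (i' j' : Nat)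
    (hi : i.toNat < arr.size) (hj : j.toNat < (arr.getD i.toNat #[]).size) :
    pvCellN (pvSetCell arr i j v) i' j'
      = if i' = i.toNat ∧ j' = j.toNat then v else pvCellN arr i' j' := by
  unfold pvSetCell pvCellN
  rw [pv_getD_modify]
  by_cases hii : i' = i.toNat
  · subst hii
    rw [if_pos ⟨rfl, hi⟩, pv_getD_set]
    by_cases hjj : j' = j.toNat
    · rw [if_pos ⟨hjj, hj⟩, if_pos ⟨rfl, hjj⟩]
    · rw [if_neg (by tauto), if_neg (by tauto)]
  · rw [if_neg (by tauto), if_neg (by tauto)]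

-- shape bookkeeping
def pvShape (arr : Array (Array Int)) (nn mm : Nat) : Prop :=
  arr.size = nn ∧ ∀ i, i < nn → (arr.getD i #[]).size = mm

theorem pvShape_set (arr : Array (Array Int)) (nn mm : Nat) (i j : Int) (v : Int)
    (hs : pvShape arr nn mm) (hi : i.toNat < nn) :
    pvShape (pvSetCell arr i j v) nn mm := by
  obtain ⟨hlen, hrow⟩ := hs
  unfold pvSetCell
  refine ⟨by simpa using hlen, fun i' hi' => ?_⟩
  rw [pv_getD_modify]
  by_cases hii : i.toNat = i' ∧ i' < arr.size
  · rw [if_pos hii, Array.size_setIfInBounds]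
    exact hrow i' hi'
  · rw [if_neg hii]
    exact hrow i' hi'

theorem pv_val_zero_left (j : Nat) : pvVal 0 j = 1 := by simp [pvVal]

theorem pv_val_zero_right (i : Nat) : pvVal i 0 = 1 := by simp [pvVal]

theorem pv_val_pascal (i j : Nat) (hi : 1 ≤ i) (hj : 1 ≤ j) :
    pvVal (i - 1) j + pvVal i (j - 1) = pvVal i j := by
  obtain ⟨p, rfl⟩ : ∃ p, i = p + 1 := ⟨i - 1, by omega⟩
  obtain ⟨q, rfl⟩ : ∃ q, j = q + 1 := ⟨j - 1, by omega⟩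
  simp only [pvVal, Nat.add_sub_cancel]
  rw [show p + 1 + q = p + q + 1 from by omega,
    show p + (q + 1) = p + q + 1 from by omega,
    show p + 1 + (q + 1) = p + q + 1 + 1 from by omega]
  exact_mod_cast (Nat.choose_succ_succ (p + q + 1) p).symm

-- the zero grid
theorem pv_cell_arr0 (n m : Int) (i j : Nat) :
    pvCellN (((PySem.List.pyRange 0 n 1).map
      (fun _ => ((PySem.List.pyRange 0 m 1).map (fun _ => (0 : Int))).toArray)).toArray) i j
      = 0 := by
  simp only [pvCellN, Array.getD_eq_getD_getElem?, List.getElem?_toArray, List.getElem?_map]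
  cases h : (PySem.List.pyRange 0 n 1)[i]?
  · simp
  · simp only [Option.map_some, Option.getD_some, List.getElem?_toArray, List.getElem?_map]
    cases h2 : (PySem.List.pyRange 0 m 1)[j]? <;> simp

theorem pv_shape_arr0 (n m : Int) (hn : 0 ≤ n) (hm : 0 ≤ m) :
    pvShape (((PySem.List.pyRange 0 n 1).map
      (fun _ => ((PySem.List.pyRange 0 m 1).map (fun _ => (0 : Int))).toArray)).toArray)
      n.toNat m.toNat := by
  have hlen : (((PySem.List.pyRange 0 n 1).map
      (fun _ => ((PySem.List.pyRange 0 m 1).map (fun _ => (0 : Int))).toArray)).toArray).size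
      = n.toNat := by
    simp [PySem.List.length_pyRange_one]
  refine ⟨hlen, fun i hi => ?_⟩
  rw [Array.getD_eq_getD_getElem?, List.getElem?_toArray,
    List.getElem?_eq_getElem (by simpa [PySem.List.length_pyRange_one] using hi),
    Option.getD_some, List.getElem_map]
  simp [PySem.List.length_pyRange_one]

-- the inner fill loop, one row
theorem pv_inner (n m : Int) (hn : 1 ≤ n) (hm : 1 ≤ m) (io : Int)
    (hio1 : 1 ≤ io) (hion : io < n) (t : Array (Array Int))
    (hsh : pvShape t n.toNat m.toNat)
    (hc : ∀ i' j', i' < n.toNat → j' < m.toNat → pvCellN t i' j'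
        = if (i' : Int) < io ∨ j' = 0 then pvVal i' j' else 0) :
    pvShape ((PySem.List.pyRange 1 m 1).foldl
        (fun a j => pvSetCell a io j (pvCell a (io - 1) j + pvCell a io (j - 1))) t)
      n.toNat m.toNat ∧
    ∀ i' j', i' < n.toNat → j' < m.toNat →
      pvCellN ((PySem.List.pyRange 1 m 1).foldl
          (fun a j => pvSetCell a io j (pvCell a (io - 1) j + pvCell a io (j - 1))) t) i' j'
        = if (i' : Int) < io + 1 ∨ j' = 0 then pvVal i' j' else 0 := by
  have hmain := pv_foldl_pyRange_inv
      (f := fun a j => pvSetCell a io j (pvCell a (io - 1) j + pvCell a io (j - 1)))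
      (inv := fun s j0 => pvShape s n.toNat m.toNat ∧
        ∀ i' j', i' < n.toNat → j' < m.toNat → pvCellN s i' j'
          = if (i' : Int) < io ∨ j' = 0 ∨ ((i' : Int) = io ∧ (j' : Int) < j0) then pvVal i' j' else 0)
      1 m t hm
      ⟨hsh, fun i' j' hi' hj' => by
        rw [hc i' j' hi' hj']
        exact if_congr (by omega) rfl rfl⟩
      ?step
  · obtain ⟨hsh3, hc3⟩ := hmain
    refine ⟨hsh3, fun i' j' hi' hj' => ?_⟩
    rw [hc3 i' j' hi' hj']
    exact if_congr (by omega) rfl rfl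
  · intro t' j hj1 hjm ⟨hsh', hc'⟩
    beta_reduce
    have hvleft : pvCell t' (io - 1) j = pvVal ((io - 1).toNat) j.toNat := by
      rw [show pvCell t' (io - 1) j = pvCellN t' (io - 1).toNat j.toNat from rfl,
        hc' _ _ (by omega) (by omega), if_pos (by omega)]
    have hvright : pvCell t' io (j - 1) = pvVal io.toNat ((j - 1).toNat) := by
      rw [show pvCell t' io (j - 1) = pvCellN t' io.toNat (j - 1).toNat from rfl,
        hc' _ _ (by omega) (by omega), if_pos (by omega)]
    have hv : pvCell t' (io - 1) j + pvCell t' io (j - 1) = pvVal io.toNat j.toNat := by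
      rw [hvleft, hvright,
        show (io - 1).toNat = io.toNat - 1 from by omega,
        show (j - 1).toNat = j.toNat - 1 from by omega]
      exact pv_val_pascal io.toNat j.toNat (by omega) (by omega)
    constructor
    · exact pvShape_set _ _ _ _ _ _ hsh' (by omega)
    · intro i' j' hi' hj'
      rw [pvCellN_set t' io j _ i' j' (by rw [hsh'.1]; omega) (by rw [hsh'.2 io.toNat (by omega)]; omega)]
      by_cases hcond : i' = io.toNat ∧ j' = j.toNat
      · rw [if_pos hcond, if_pos (by omega), hv, hcond.1, hcond.2]
      · rw [if_neg hcond, hc' i' j' hi' hj']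
        exact if_congr (by omega) rfl rfl

theorem pv_choose_swap (p q : Nat) : (p + q).choose p = (p + q).choose q := by
  rw [← Nat.choose_symm (Nat.le_add_right p q), Nat.add_sub_cancel_left]

theorem pv_A_eq_choose (n m : Int) (hn : 1 ≤ n) (hm : 1 ≤ m) :
    get_ways2 n m
      = ((((n - 1).toNat + (m - 1).toNat).choose (n - 1).toNat : Nat) : Int) := by
  simp only [get_ways2]
  set arr0 := ((PySem.List.pyRange 0 n 1).map
      (fun _ => ((PySem.List.pyRange 0 m 1).map (fun _ => (0 : Int))).toArray)).toArray with harr0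
  set arr1 := (PySem.List.pyRange 0 n 1).foldl (fun a i => pvSetCell a i 0 1) arr0 with harr1
  set arr2 := (PySem.List.pyRange 0 m 1).foldl (fun a j => pvSetCell a 0 j 1) arr1 with harr2
  set arr3 := (PySem.List.pyRange 1 n 1).foldl (fun a i =>
      (PySem.List.pyRange 1 m 1).foldl (fun a j =>
        pvSetCell a i j (pvCell a (i - 1) j + pvCell a i (j - 1))) a) arr2 with harr3
  -- phase 1: first column set to 1
  have h1 := pv_foldl_pyRange_inv (f := fun a i => pvSetCell a i 0 1)
      (inv := fun s i0 => pvShape s n.toNat m.toNat ∧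
        ∀ i' j', i' < n.toNat → j' < m.toNat →
          pvCellN s i' j' = if j' = 0 ∧ (i' : Int) < i0 then 1 else 0)
      0 n arr0 (by omega)
      ⟨pv_shape_arr0 n m (by omega) (by omega), fun i' j' _ _ => by
        rw [pv_cell_arr0, if_neg (by omega)]⟩
      (fun t i hi0 hin ht => by
        obtain ⟨hsh, hc⟩ := ht
        beta_reduce
        refine ⟨pvShape_set _ _ _ _ _ _ hsh (by omega), fun i' j' hi' hj' => ?_⟩
        rw [pvCellN_set t i 0 1 i' j' (by rw [hsh.1]; omega)
          (by rw [hsh.2 i.toNat (by omega)]; omega)]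
        by_cases hcond : i' = i.toNat ∧ j' = (0 : Int).toNat
        · rw [if_pos hcond, if_pos (by omega)]
        · rw [if_neg hcond, hc i' j' hi' hj']
          exact if_congr (by omega) rfl rfl)
  obtain ⟨hsh1, hc1⟩ := h1
  -- phase 2: first row set to 1
  have h2 := pv_foldl_pyRange_inv (f := fun a j => pvSetCell a 0 j 1)
      (inv := fun s j0 => pvShape s n.toNat m.toNat ∧
        ∀ i' j', i' < n.toNat → j' < m.toNat →
          pvCellN s i' j' = if (i' = 0 ∧ (j' : Int) < j0) ∨ j' = 0 then 1 else 0)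
      0 m arr1 (by omega)
      ⟨hsh1, fun i' j' hi' hj' => by
        rw [hc1 i' j' hi' hj']
        exact if_congr (by omega) rfl rfl⟩
      (fun t j hj0 hjm ht => by
        obtain ⟨hsh, hc⟩ := ht
        beta_reduce
        refine ⟨pvShape_set _ _ _ _ _ _ hsh (by omega), fun i' j' hi' hj' => ?_⟩
        rw [pvCellN_set t 0 j 1 i' j' (by rw [hsh.1]; omega)
          (by rw [hsh.2 (0 : Int).toNat (by omega)]; omega)]
        by_cases hcond : i' = (0 : Int).toNat ∧ j' = j.toNat
        · rw [if_pos hcond, if_pos (by omega)]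
        · rw [if_neg hcond, hc i' j' hi' hj']
          exact if_congr (by omega) rfl rfl)
  obtain ⟨hsh2, hc2⟩ := h2
  -- phase 3: the Pascal fill
  have h3 := pv_foldl_pyRange_inv
      (f := fun a i => (PySem.List.pyRange 1 m 1).foldl (fun a j =>
        pvSetCell a i j (pvCell a (i - 1) j + pvCell a i (j - 1))) a)
      (inv := fun s i0 => pvShape s n.toNat m.toNat ∧
        ∀ i' j', i' < n.toNat → j' < m.toNat →
          pvCellN s i' j' = if (i' : Int) < i0 ∨ j' = 0 then pvVal i' j' else 0)
      1 n arr2 hn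
      ⟨hsh2, fun i' j' hi' hj' => by
        rw [hc2 i' j' hi' hj']
        by_cases hca : (i' : Int) < 1 ∨ j' = 0
        · rw [if_pos (show (i' = 0 ∧ (j' : Int) < m) ∨ j' = 0 from by omega), if_pos hca]
          rcases hca with h | h
          · rw [show i' = 0 from by omega, pv_val_zero_left]
          · rw [h, pv_val_zero_right]
        · rw [if_neg (show ¬((i' = 0 ∧ (j' : Int) < m) ∨ j' = 0) from by omega), if_neg hca]⟩
      (fun t i hi1 hin ht => by
        obtain ⟨hsh, hc⟩ := ht
        beta_reduce
        exact ⟨(pv_inner n m hn hm i hi1 hin t hsh hc).1,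
          (pv_inner n m hn hm i hi1 hin t hsh hc).2⟩)
  obtain ⟨hsh3, hc3⟩ := h3
  have hlen3 : arr3.size = n.toNat := hsh3.1
  have hrow3 : (arr3.getD (n.toNat - 1) #[]).size = m.toNat := hsh3.2 _ (by omega)
  have hget1 : PySem.List.pyGet? arr3.toList (-1) = some (arr3.getD (n.toNat - 1) #[]) := by
    rw [PySem.List.pyGet?_neg_one, List.getLast?_eq_getElem?, Array.length_toList, hlen3,
      Array.getElem?_toList, Array.getElem?_eq_getElem (by omega),
      pv_getD_eq_getElem arr3 (n.toNat - 1) #[] (by omega)]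
  have hget2 : PySem.List.pyGet? (arr3.getD (n.toNat - 1) #[]).toList (-1)
      = some ((arr3.getD (n.toNat - 1) #[]).getD (m.toNat - 1) 0) := by
    rw [PySem.List.pyGet?_neg_one, List.getLast?_eq_getElem?, Array.length_toList, hrow3,
      Array.getElem?_toList, Array.getElem?_eq_getElem (by omega),
      pv_getD_eq_getElem _ (m.toNat - 1) 0 (by omega)]
  rw [hget1, Option.getD_some, hget2, Option.getD_some]
  rw [show (arr3.getD (n.toNat - 1) #[]).getD (m.toNat - 1) 0
      = pvCellN arr3 (n.toNat - 1) (m.toNat - 1) from rfl]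
  rw [hc3 (n.toNat - 1) (m.toNat - 1) (by omega) (by omega), if_pos (by omega)]
  simp only [pvVal]
  rw [show n.toNat - 1 = (n - 1).toNat from by omega,
    show m.toNat - 1 = (m - 1).toNat from by omega]

-- B's multiplicative loop computes C((a+b).toNat, k.toNat) for k = min a b, a b ≥ 0
theorem pv_B_eq_choose (n m : Int) (hn : 1 ≤ n) (hm : 1 ≤ m) :
    get_ways2_alt n m
      = ((((n - 1) + (m - 1)).toNat.choose (min (n - 1) (m - 1)).toNat : Nat) : Int) := by
  simp only [get_ways2_alt]
  rw [if_neg (by omega)]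
  set a := n - 1 with ha
  set b := m - 1 with hb
  set k := min a b with hk
  have hk0 : 0 ≤ k := by omega
  have hkab : k ≤ a + b := by omega
  set t := (a + b - k).toNat with ht
  have hout := pv_foldl_pyRange_inv
      (f := fun res i => PySem.Int.floordiv (res * (a + b - k + i)) i)
      (inv := fun s i0 => s = (((t + (i0 - 1).toNat).choose (i0 - 1).toNat : Nat) : Int))
      1 (k + 1) 1 (by omega)
      (by simp)
      (fun s i hi1 hik hs => by
        beta_reduce
        obtain ⟨p, hp⟩ : ∃ p : Nat, i = (p : Int) + 1 := ⟨(i - 1).toNat, by omega⟩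
        have hip : (i - 1).toNat = p := by omega
        have hip1 : (i + 1 - 1).toNat = p + 1 := by omega
        rw [hs, hip, hip1]
        have harg : a + b - k + i = (((t + p + 1 : Nat)) : Int) := by push_cast; omega
        rw [harg, hp]
        have hmulcast : (((t + p).choose p : Nat) : Int) * (((t + p + 1 : Nat)) : Int)
            = ((((t + p).choose p * (t + p + 1) : Nat)) : Int) := by push_cast; ring
        rw [hmulcast]
        have hkey : (t + p).choose p * (t + p + 1) = (t + (p + 1)).choose (p + 1) * (p + 1) := by
          have h' := Nat.succ_mul_choose_eq (t + p) p
          simp only [Nat.succ_eq_add_one] at h'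
          rw [show t + (p + 1) = t + p + 1 from by omega, Nat.mul_comm]
          exact h'
        rw [hkey]
        have : ((p : Int) + 1) = (((p + 1 : Nat)) : Int) := by push_cast; ring
        rw [this, PySem.Int.floordiv_natCast]
        rw [Nat.mul_div_cancel _ (by omega)])
  rw [hout]
  have h1 : (k + 1 - 1).toNat = k.toNat := by omega
  have h2 : t + k.toNat = (a + b).toNat := by omega
  rw [h1, h2]

-- ===== VERDICT (by name: the statement is the Claim_ definition above) =====
theorem get_ways2_spec : Claim_equal_get_ways2 := by
  intro n m _ hpre
  obtain ⟨hn, hm⟩ := hpre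
  unfold Spec_get_ways2
  rw [pv_A_eq_choose n m hn hm, pv_B_eq_choose n m hn hm]
  have hsum : ((n - 1) + (m - 1)).toNat = (n - 1).toNat + (m - 1).toNat := by omega
  have h : ((n - 1).toNat + (m - 1).toNat).choose (n - 1).toNat
      = ((n - 1) + (m - 1)).toNat.choose (min (n - 1) (m - 1)).toNat := by
    rw [hsum]
    rcases le_or_gt (n - 1) (m - 1) with hle | hgt
    · rw [show (min (n - 1) (m - 1)).toNat = (n - 1).toNat from by omega]
    · rw [show (min (n - 1) (m - 1)).toNat = (m - 1).toNat from by omega]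
      exact pv_choose_swap (n - 1).toNat (m - 1).toNat
  exact_mod_cast h
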